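-- pv_equiv track=rewrite | github.com/HexHive/Igor | TraceClusterMaker/cluster.py | Calculate__TFPN
-- ===== SOURCE A (Python) =====
-- import typing
--
-- def Calculate__TFPN(result_lst :typing.List[str], truth_lst :typing.List[str]) -> typing.Tuple[int,int,int,int] :
--     """ Calculate TP, TN, FP, FN
--
--     https://nlp.stanford.edu/IR-book/html/htmledition/evaluation-of-clustering-1.html
--
--     An alternative to this information-theoretic interpretation of clustering is to
--     view it as a series of decisions, one for each of the $N(N-1)/2$ pairs of documents
--     in the collection. We want to assign two documents to the same cluster if and only
--     if they are similar.
--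
--     A TP (true positive) decision assigns two similar documents to the same cluster.
--     A TN (true negative) decision assigns two dissimilar documents to different clusters.
--     There are two types of errors we can commit.
--     A (FP) decision assigns two dissimilar documents to the same cluster.
--     A (FN) decision assigns two similar documents to different clusters.
--     """
--     assert (len(result_lst) == len(truth_lst)) , "Unmatched length!"
--     L  = len(result_lst)
--     SS_TP = 0 # Same cluster & Same class
--     DD_TN = 0 # Diff cluster & Diff class
--     SD_FP = 0 # Same cluster & Diff class
--     DS_FN = 0 # Diff cluster & Same class
--
--     for i in range(L):
--         for j in range(1+i , L):
--             if   (result_lst[i] == result_lst[j]) and (truth_lst[i] == truth_lst[j]):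
--                 # same cluster, same class
--                 SS_TP += 1
--             elif (result_lst[i] == result_lst[j]) and (truth_lst[i] != truth_lst[j]):
--                 # same cluster, diff class
--                 SD_FP += 1
--             elif (result_lst[i] != result_lst[j]) and (truth_lst[i] == truth_lst[j]):
--                 # diff cluster, same class
--                 DS_FN += 1
--             elif (result_lst[i] != result_lst[j]) and (truth_lst[i] != truth_lst[j]):
--                 # diff cluster, diff class
--                 DD_TN += 1
--
--     return SS_TP, DD_TN, SD_FP, DS_FN
-- ===== SOURCE B (Python) =====
-- def Calculate__TFPN(result_lst, truth_lst):
--     """One pass with running counters: for each position, the number of earlier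
--     positions sharing the same (cluster, class) / cluster / class key is added,
--     which counts exactly the pairs A enumerates; TN is derived from the total
--     number of pairs."""
--     assert (len(result_lst) == len(truth_lst)), "Unmatched length!"
--     L = len(result_lst)
--     both = {}
--     clus = {}
--     clas = {}
--     tp = sc = sk = 0
--     for r, t in zip(result_lst, truth_lst):
--         tp += both.get((r, t), 0)
--         sc += clus.get(r, 0)
--         sk += clas.get(t, 0)
--         both[(r, t)] = both.get((r, t), 0) + 1
--         clus[r] = clus.get(r, 0) + 1
--         clas[t] = clas.get(t, 0) + 1
--     fp = sc - tp
--     fn = sk - tp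
--     tn = L * (L - 1) // 2 - tp - fp - fn
--     return tp, tn, fp, fn
-- ===== Notes on version B (the rewrite author's own statement) =====
-- stated objective: faster
-- what changed: Replaced the O(N^2) scan over all index pairs by a single pass that keeps hash-map counters of (cluster,class), cluster and class keys, adding for each element the number of earlier elements with the same key, and derives TN from the total pair count N(N-1)/2.
import Mathlib
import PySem

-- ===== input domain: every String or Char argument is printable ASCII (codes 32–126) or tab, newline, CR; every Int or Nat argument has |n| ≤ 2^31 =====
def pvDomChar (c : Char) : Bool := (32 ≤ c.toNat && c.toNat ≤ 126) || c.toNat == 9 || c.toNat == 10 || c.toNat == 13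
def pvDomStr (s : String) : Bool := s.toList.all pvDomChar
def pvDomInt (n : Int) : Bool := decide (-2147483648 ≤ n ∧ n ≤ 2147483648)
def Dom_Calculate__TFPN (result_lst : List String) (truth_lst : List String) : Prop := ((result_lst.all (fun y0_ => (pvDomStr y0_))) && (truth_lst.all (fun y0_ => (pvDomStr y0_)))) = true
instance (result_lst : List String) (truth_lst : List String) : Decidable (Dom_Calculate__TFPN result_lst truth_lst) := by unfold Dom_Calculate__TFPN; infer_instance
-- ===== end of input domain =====

-- B replaces A's O(N^2) double loop over index pairs by a single pass with
-- hash-map counters (pairs with an equal key counted via earlier occurrences),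
-- deriving TN from the total pair count; return value only (A mutates nothing).

-- ===== PORT A =====
def Calculate__TFPN (result_lst : List String) (truth_lst : List String) : List Int :=
  let L : Int := (result_lst.length : Int)
  let r := (PySem.List.pyRange 0 L 1).foldl (fun acc i =>
    (PySem.List.pyRange (1 + i) L 1).foldl (fun acc j =>
      if (PySem.List.pyGetD result_lst i "" == PySem.List.pyGetD result_lst j "")
         && (PySem.List.pyGetD truth_lst i "" == PySem.List.pyGetD truth_lst j "") then
        (acc.1 + 1, acc.2.1, acc.2.2.1, acc.2.2.2)
      else if (PySem.List.pyGetD result_lst i "" == PySem.List.pyGetD result_lst j "")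
         && !(PySem.List.pyGetD truth_lst i "" == PySem.List.pyGetD truth_lst j "") then
        (acc.1, acc.2.1, acc.2.2.1 + 1, acc.2.2.2)
      else if !(PySem.List.pyGetD result_lst i "" == PySem.List.pyGetD result_lst j "")
         && (PySem.List.pyGetD truth_lst i "" == PySem.List.pyGetD truth_lst j "") then
        (acc.1, acc.2.1, acc.2.2.1, acc.2.2.2 + 1)
      else if !(PySem.List.pyGetD result_lst i "" == PySem.List.pyGetD result_lst j "")
         && !(PySem.List.pyGetD truth_lst i "" == PySem.List.pyGetD truth_lst j "") then
        (acc.1, acc.2.1 + 1, acc.2.2.1, acc.2.2.2)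
      else acc) acc) (((0 : Int), (0 : Int), (0 : Int), (0 : Int)))
  [r.1, r.2.1, r.2.2.1, r.2.2.2]

-- ===== PORT B =====
def Calculate__TFPN_alt (result_lst : List String) (truth_lst : List String) : List Int :=
  let L : Int := (result_lst.length : Int)
  let st := (result_lst.zip truth_lst).foldl
    (fun st p =>
      (st.1.modify p 0 (· + 1),
       st.2.1.modify p.1 0 (· + 1),
       st.2.2.1.modify p.2 0 (· + 1),
       st.2.2.2.1 + st.1.getD p 0,
       st.2.2.2.2.1 + st.2.1.getD p.1 0,
       st.2.2.2.2.2 + st.2.2.1.getD p.2 0))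
    ((PySem.Dict.empty : PySem.Dict (String × String) Int),
     (PySem.Dict.empty : PySem.Dict String Int),
     (PySem.Dict.empty : PySem.Dict String Int),
     (0 : Int), (0 : Int), (0 : Int))
  let tp := st.2.2.2.1
  let sc := st.2.2.2.2.1
  let sk := st.2.2.2.2.2
  let fp := sc - tp
  let fn := sk - tp
  let tn := PySem.Int.floordiv (L * (L - 1)) 2 - tp - fp - fn
  [tp, tn, fp, fn]

-- ===== PRECONDITION & SPEC =====
-- A asserts len(result_lst) == len(truth_lst) and raises AssertionError otherwise;
-- Pre_ admits exactly the inputs where the assert passes.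
def Pre_Calculate__TFPN (result_lst : List String) (truth_lst : List String) : Prop :=
  result_lst.length = truth_lst.length
instance (result_lst : List String) (truth_lst : List String) : Decidable (Pre_Calculate__TFPN result_lst truth_lst) := by unfold Pre_Calculate__TFPN; infer_instance
def pvWitness_Calculate__TFPN : List String × List String := (["a", "b", "a"], ["x", "x", "y"])

def Spec_Calculate__TFPN (result_lst : List String) (truth_lst : List String) (out : List Int) : Prop := out = Calculate__TFPN_alt result_lst truth_lst
instance (result_lst : List String) (truth_lst : List String) (out : List Int) : Decidable (Spec_Calculate__TFPN result_lst truth_lst out) := by unfold Spec_Calculate__TFPN; infer_instance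

-- ===== CLAIM (what is proved, stated in full; the proofs are below) =====
def Claim_equal_Calculate__TFPN : Prop := ∀ (result_lst : List String) (truth_lst : List String), Dom_Calculate__TFPN result_lst truth_lst → Pre_Calculate__TFPN result_lst truth_lst → Spec_Calculate__TFPN result_lst truth_lst (Calculate__TFPN result_lst truth_lst)

-- ===== LEMMAS AND PROOFS =====

-- the four pair predicates of A's if/elif chain (x = earlier element, y = later element)
def pvSS (x y : String × String) : Bool := (x.1 == y.1) && (x.2 == y.2)
def pvSD (x y : String × String) : Bool := (x.1 == y.1) && !(x.2 == y.2)
def pvDS (x y : String × String) : Bool := !(x.1 == y.1) && (x.2 == y.2)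
def pvDD (x y : String × String) : Bool := !(x.1 == y.1) && !(x.2 == y.2)

-- number of index pairs i < j whose elements satisfy q (first argument = earlier element)
def pvCP (q : String × String → String × String → Bool) : List (String × String) → Nat
  | [] => 0
  | x :: xs => xs.countP (q x) + pvCP q xs

theorem pvCP_congr (q q' : String × String → String × String → Bool)
    (h : ∀ x y, q x y = q' x y) (z : List (String × String)) : pvCP q z = pvCP q' z := by
  induction z with
  | nil => rfl
  | cons x xs ih =>
      simp only [pvCP, ih]
      congr 1
      exact List.countP_congr (fun y _ => by rw [h])

theorem pvCountP_split (p r : String × String → Bool) (l : List (String × String)) :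
    l.countP p = l.countP (fun y => p y && r y) + l.countP (fun y => p y && !r y) := by
  induction l with
  | nil => rfl
  | cons x xs ih => cases hp : p x <;> cases hr : r x <;> simp [hp, hr, ih] <;> omega

theorem pvCP_split (q r : String × String → String × String → Bool) (z : List (String × String)) :
    pvCP q z = pvCP (fun x y => q x y && r x y) z + pvCP (fun x y => q x y && !r x y) z := by
  induction z with
  | nil => rfl
  | cons x xs ih => simp only [pvCP, ih, pvCountP_split (q x) (r x) xs]; omega

theorem pvCP_true (z : List (String × String)) :
    2 * pvCP (fun _ _ => true) z + z.length = z.length * z.length := by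
  induction z with
  | nil => rfl
  | cons x xs ih =>
      simp only [pvCP, List.countP_true, List.length_cons]
      nlinarith [ih]

-- A's inner-loop body as a function of the two zipped elements
def pvStep (x : String × String) (acc : Int × Int × Int × Int) (y : String × String) :
    Int × Int × Int × Int :=
  if (x.1 == y.1) && (x.2 == y.2) then (acc.1 + 1, acc.2.1, acc.2.2.1, acc.2.2.2)
  else if (x.1 == y.1) && !(x.2 == y.2) then (acc.1, acc.2.1, acc.2.2.1 + 1, acc.2.2.2)
  else if !(x.1 == y.1) && (x.2 == y.2) then (acc.1, acc.2.1, acc.2.2.1, acc.2.2.2 + 1)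
  else if !(x.1 == y.1) && !(x.2 == y.2) then (acc.1, acc.2.1 + 1, acc.2.2.1, acc.2.2.2)
  else acc

theorem pvStep_fold (x : String × String) (s : List (String × String)) :
    ∀ acc : Int × Int × Int × Int,
    s.foldl (pvStep x) acc =
      (acc.1 + (s.countP (pvSS x) : Int), acc.2.1 + (s.countP (pvDD x) : Int),
       acc.2.2.1 + (s.countP (pvSD x) : Int), acc.2.2.2 + (s.countP (pvDS x) : Int)) := by
  induction s with
  | nil => intro acc; simp
  | cons y ys ih =>
      intro acc
      rw [List.foldl_cons, ih]
      cases h1 : (x.1 == y.1) <;> cases h2 : (x.2 == y.2) <;>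
        simp [pvStep, pvSS, pvSD, pvDS, pvDD, h1, h2] <;> push_cast <;> ring_nf

theorem pvGetZip (r t : List String) (h : r.length = t.length) (j : Int)
    (h0 : 0 ≤ j) (hj : j < (r.length : Int)) :
    PySem.List.pyGetD r j "" = (PySem.List.pyGetD (r.zip t) j ("", "")).1 ∧
    PySem.List.pyGetD t j "" = (PySem.List.pyGetD (r.zip t) j ("", "")).2 := by
  have hzl : (r.zip t).length = r.length := by rw [List.length_zip, h, min_self]
  have hjr : j.toNat < r.length := by omega
  have hjt : j.toNat < t.length := by omega
  have hjz : j.toNat < (r.zip t).length := by omega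
  rw [PySem.List.pyGetD_eq_getElem r "" h0 hj,
      PySem.List.pyGetD_eq_getElem t "" h0 (by omega),
      PySem.List.pyGetD_eq_getElem (r.zip t) ("", "") h0 (by omega)]
  simp [List.getElem_zip]

-- outer loop of A over the zipped list, characterised suffix by suffix
theorem pvOuter (z : List (String × String)) (m : Nat) :
    ∀ (k : Nat) (acc : Int × Int × Int × Int), k + m = z.length →
    (PySem.List.pyRange (k : Int) ((z.length : Nat) : Int) 1).foldl
        (fun acc i => (z.drop (i.toNat + 1)).foldl
          (pvStep (PySem.List.pyGetD z i ("", ""))) acc) acc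
    = (acc.1 + (pvCP pvSS (z.drop k) : Int), acc.2.1 + (pvCP pvDD (z.drop k) : Int),
       acc.2.2.1 + (pvCP pvSD (z.drop k) : Int), acc.2.2.2 + (pvCP pvDS (z.drop k) : Int)) := by
  induction m with
  | zero =>
      intro k acc h
      rw [PySem.List.pyRange_one_eq_nil (by exact_mod_cast Nat.le_of_eq (by omega))]
      rw [List.drop_eq_nil_of_le (by omega)]
      simp [pvCP]
  | succ m ih =>
      intro k acc h
      have hk : k < z.length := by omega
      rw [PySem.List.pyRange_one_cons (by exact_mod_cast hk), List.foldl_cons]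
      have htn : ((k : Int)).toNat = k := Int.toNat_natCast k
      have hget : PySem.List.pyGetD z (k : Int) ("", "") = z[k] := by
        rw [PySem.List.pyGetD_natCast, List.getD_eq_getElem?_getD, List.getElem?_eq_getElem hk]
        rfl
      rw [htn, hget, pvStep_fold]
      have hcast : (k : Int) + 1 = ((k + 1 : Nat) : Int) := by push_cast; ring
      rw [hcast, ih (k + 1) _ (by omega)]
      rw [List.drop_eq_getElem_cons hk]
      simp only [pvCP, Prod.mk.injEq]
      refine ⟨?_, ?_, ?_, ?_⟩ <;> push_cast <;> ring

theorem pvA_char (r t : List String) (h : r.length = t.length) :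
    Calculate__TFPN r t =
      [(pvCP pvSS (r.zip t) : Int), (pvCP pvDD (r.zip t) : Int),
       (pvCP pvSD (r.zip t) : Int), (pvCP pvDS (r.zip t) : Int)] := by
  have hzl : (r.zip t).length = r.length := by rw [List.length_zip, h, min_self]
  unfold Calculate__TFPN
  dsimp only
  have hcong : ∀ (acc : Int × Int × Int × Int) (i : Int), i ∈ PySem.List.pyRange 0 (r.length : Int) 1 →
      (PySem.List.pyRange (1 + i) (r.length : Int) 1).foldl (fun acc j =>
        if (PySem.List.pyGetD r i "" == PySem.List.pyGetD r j "")
           && (PySem.List.pyGetD t i "" == PySem.List.pyGetD t j "") then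
          (acc.1 + 1, acc.2.1, acc.2.2.1, acc.2.2.2)
        else if (PySem.List.pyGetD r i "" == PySem.List.pyGetD r j "")
           && !(PySem.List.pyGetD t i "" == PySem.List.pyGetD t j "") then
          (acc.1, acc.2.1, acc.2.2.1 + 1, acc.2.2.2)
        else if !(PySem.List.pyGetD r i "" == PySem.List.pyGetD r j "")
           && (PySem.List.pyGetD t i "" == PySem.List.pyGetD t j "") then
          (acc.1, acc.2.1, acc.2.2.1, acc.2.2.2 + 1)
        else if !(PySem.List.pyGetD r i "" == PySem.List.pyGetD r j "")
           && !(PySem.List.pyGetD t i "" == PySem.List.pyGetD t j "") then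
          (acc.1, acc.2.1 + 1, acc.2.2.1, acc.2.2.2)
        else acc) acc
      = (r.zip t |>.drop (i.toNat + 1)).foldl (pvStep (PySem.List.pyGetD (r.zip t) i ("", ""))) acc := by
    intro acc i hi
    rw [PySem.List.mem_pyRange_one] at hi
    have hinner : ∀ (acc' : Int × Int × Int × Int) (j : Int), j ∈ PySem.List.pyRange (1 + i) (r.length : Int) 1 →
        (if (PySem.List.pyGetD r i "" == PySem.List.pyGetD r j "")
           && (PySem.List.pyGetD t i "" == PySem.List.pyGetD t j "") then
          (acc'.1 + 1, acc'.2.1, acc'.2.2.1, acc'.2.2.2)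
        else if (PySem.List.pyGetD r i "" == PySem.List.pyGetD r j "")
           && !(PySem.List.pyGetD t i "" == PySem.List.pyGetD t j "") then
          (acc'.1, acc'.2.1, acc'.2.2.1 + 1, acc'.2.2.2)
        else if !(PySem.List.pyGetD r i "" == PySem.List.pyGetD r j "")
           && (PySem.List.pyGetD t i "" == PySem.List.pyGetD t j "") then
          (acc'.1, acc'.2.1, acc'.2.2.1, acc'.2.2.2 + 1)
        else if !(PySem.List.pyGetD r i "" == PySem.List.pyGetD r j "")
           && !(PySem.List.pyGetD t i "" == PySem.List.pyGetD t j "") then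
          (acc'.1, acc'.2.1 + 1, acc'.2.2.1, acc'.2.2.2)
        else acc')
        = pvStep (PySem.List.pyGetD (r.zip t) i ("", "")) acc' (PySem.List.pyGetD (r.zip t) j ("", "")) := by
      intro acc' j hj
      rw [PySem.List.mem_pyRange_one] at hj
      obtain ⟨hri, hti⟩ := pvGetZip r t h i hi.1 hi.2
      obtain ⟨hrj, htj⟩ := pvGetZip r t h j (by omega) hj.2
      rw [hri, hti, hrj, htj]
      rfl
    rw [PySem.List.foldl_congr_mem _ _ _ _ hinner]
    have hlz : (r.length : Int) = ((r.zip t).length : Int) := by rw [hzl]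
    rw [hlz, PySem.List.foldl_pyRange_pyGetD' (r.zip t) ("", "")
          (pvStep (PySem.List.pyGetD (r.zip t) i ("", ""))) acc (by omega)]
    have : (1 + i).toNat = i.toNat + 1 := by omega
    rw [this]
  rw [PySem.List.foldl_congr_mem _ _ _ _ hcong]
  have hlz : (r.length : Int) = (((r.zip t).length : Nat) : Int) := by rw [hzl]
  rw [hlz]
  have hout := pvOuter (r.zip t) (r.zip t).length 0 (0, 0, 0, 0) (by omega)
  rw [Nat.cast_zero, List.drop_zero] at hout
  rw [hout]
  simp

-- getD-sums over a modified counter dict, for the three key projections of B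
theorem pvSumModify1 (zs : List (String × String)) (d : PySem.Dict (String × String) Int)
    (x : String × String) :
    (zs.map (fun q => (d.modify x 0 (· + 1)).getD q 0)).sum
      = (zs.map (fun q => d.getD q 0)).sum + (zs.countP (fun q => q == x) : Int) := by
  have hmap : zs.map (fun q => (d.modify x 0 (· + 1)).getD q 0)
      = zs.map (fun q => d.getD q 0 + if (fun q => q == x) q then (1 : Int) else 0) := by
    refine List.map_congr_left (fun q _ => ?_)
    rw [PySem.Dict.getD_modify]
    by_cases hq : q = x <;> simp [hq]
  rw [hmap, PySem.List.sum_map_add_int, PySem.List.sum_map_ite_one_zero]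

theorem pvSumModify2 (zs : List (String × String)) (d : PySem.Dict String Int)
    (x : String × String) :
    (zs.map (fun q => (d.modify x.1 0 (· + 1)).getD q.1 0)).sum
      = (zs.map (fun q => d.getD q.1 0)).sum + (zs.countP (fun q => q.1 == x.1) : Int) := by
  have hmap : zs.map (fun q => (d.modify x.1 0 (· + 1)).getD q.1 0)
      = zs.map (fun q => d.getD q.1 0 + if (fun q : String × String => q.1 == x.1) q then (1 : Int) else 0) := by
    refine List.map_congr_left (fun q _ => ?_)
    rw [PySem.Dict.getD_modify]
    by_cases hq : q.1 = x.1 <;> simp [hq]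
  rw [hmap, PySem.List.sum_map_add_int, PySem.List.sum_map_ite_one_zero]

theorem pvSumModify3 (zs : List (String × String)) (d : PySem.Dict String Int)
    (x : String × String) :
    (zs.map (fun q => (d.modify x.2 0 (· + 1)).getD q.2 0)).sum
      = (zs.map (fun q => d.getD q.2 0)).sum + (zs.countP (fun q => q.2 == x.2) : Int) := by
  have hmap : zs.map (fun q => (d.modify x.2 0 (· + 1)).getD q.2 0)
      = zs.map (fun q => d.getD q.2 0 + if (fun q : String × String => q.2 == x.2) q then (1 : Int) else 0) := by
    refine List.map_congr_left (fun q _ => ?_)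
    rw [PySem.Dict.getD_modify]
    by_cases hq : q.2 = x.2 <;> simp [hq]
  rw [hmap, PySem.List.sum_map_add_int, PySem.List.sum_map_ite_one_zero]

-- B's single pass, characterised with arbitrary starting dicts and accumulators
theorem pvBfold (z : List (String × String)) :
    ∀ (b : PySem.Dict (String × String) Int) (c k : PySem.Dict String Int) (tp sc sk : Int),
    z.foldl (fun st p =>
        (st.1.modify p 0 (· + 1),
         st.2.1.modify p.1 0 (· + 1),
         st.2.2.1.modify p.2 0 (· + 1),
         st.2.2.2.1 + st.1.getD p 0,
         st.2.2.2.2.1 + st.2.1.getD p.1 0,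
         st.2.2.2.2.2 + st.2.2.1.getD p.2 0)) (b, c, k, tp, sc, sk)
    = (z.foldl (fun d p => d.modify p 0 (· + 1)) b,
       z.foldl (fun d p => d.modify p.1 0 (· + 1)) c,
       z.foldl (fun d p => d.modify p.2 0 (· + 1)) k,
       tp + (z.map (fun p => b.getD p 0)).sum + (pvCP (fun x y => y == x) z : Int),
       sc + (z.map (fun p => c.getD p.1 0)).sum + (pvCP (fun x y => y.1 == x.1) z : Int),
       sk + (z.map (fun p => k.getD p.2 0)).sum + (pvCP (fun x y => y.2 == x.2) z : Int)) := by
  induction z with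
  | nil => intro b c k tp sc sk; simp [pvCP]
  | cons p zs ih =>
      intro b c k tp sc sk
      rw [List.foldl_cons, ih]
      simp only [List.foldl_cons, List.map_cons, List.sum_cons, pvCP, Prod.mk.injEq,
        pvSumModify1, pvSumModify2, pvSumModify3, true_and]
      refine ⟨?_, ?_, ?_⟩ <;> push_cast <;> ring

-- ===== VERDICT (by name: the statement is the Claim_ definition above) =====
theorem Calculate__TFPN_spec : Claim_equal_Calculate__TFPN := by
  intro r t _ hpre
  unfold Spec_Calculate__TFPN
  have h : r.length = t.length := hpre
  have hzl : (r.zip t).length = r.length := by rw [List.length_zip, h, min_self]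
  rw [pvA_char r t h]
  unfold Calculate__TFPN_alt
  dsimp only
  rw [pvBfold (r.zip t) PySem.Dict.empty PySem.Dict.empty PySem.Dict.empty 0 0 0]
  have hempty1 : ∀ p : String × String, (PySem.Dict.empty : PySem.Dict (String × String) Int).getD p 0 = 0 := by
    intro p; simp [pysem]
  have hempty2 : ∀ s : String, (PySem.Dict.empty : PySem.Dict String Int).getD s 0 = 0 := by
    intro s; simp [pysem]
  simp only [hempty1, hempty2]
  simp only [List.map_const', List.sum_replicate, smul_zero, zero_add, add_zero]
  -- name the four counts
  set z := r.zip t with hz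
  have e1 : pvCP (fun x y => y == x) z = pvCP pvSS z := by
    refine pvCP_congr _ _ (fun x y => ?_) z
    rw [Bool.eq_iff_iff]
    simp only [pvSS, Bool.and_eq_true, beq_iff_eq, Prod.ext_iff]
    exact ⟨fun ⟨h1, h2⟩ => ⟨h1.symm, h2.symm⟩, fun ⟨h1, h2⟩ => ⟨h1.symm, h2.symm⟩⟩
  have e2 : pvCP (fun x y => y.1 == x.1) z = pvCP pvSS z + pvCP pvSD z := by
    have := pvCP_split (fun x y : String × String => y.1 == x.1)
      (fun x y : String × String => x.2 == y.2) z
    rw [this]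
    congr 1
    · refine pvCP_congr _ _ (fun x y => ?_) z
      rw [Bool.eq_iff_iff]
      simp only [pvSS, Bool.and_eq_true, beq_iff_eq]
      exact ⟨fun ⟨h1, h2⟩ => ⟨h1.symm, h2⟩, fun ⟨h1, h2⟩ => ⟨h1.symm, h2⟩⟩
    · refine pvCP_congr _ _ (fun x y => ?_) z
      rw [Bool.eq_iff_iff]
      simp only [pvSD, Bool.and_eq_true, Bool.not_eq_true', beq_eq_false_iff_ne, beq_iff_eq]
      exact ⟨fun ⟨h1, h2⟩ => ⟨h1.symm, h2⟩, fun ⟨h1, h2⟩ => ⟨h1.symm, h2⟩⟩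
  have e3 : pvCP (fun x y => y.2 == x.2) z = pvCP pvSS z + pvCP pvDS z := by
    have := pvCP_split (fun x y : String × String => y.2 == x.2)
      (fun x y : String × String => x.1 == y.1) z
    rw [this]
    congr 1
    · refine pvCP_congr _ _ (fun x y => ?_) z
      rw [Bool.eq_iff_iff]
      simp only [pvSS, Bool.and_eq_true, beq_iff_eq]
      exact ⟨fun ⟨h1, h2⟩ => ⟨h2, h1.symm⟩, fun ⟨h1, h2⟩ => ⟨h2.symm, h1⟩⟩
    · refine pvCP_congr _ _ (fun x y => ?_) z
      rw [Bool.eq_iff_iff]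
      simp only [pvDS, Bool.and_eq_true, Bool.not_eq_true', beq_eq_false_iff_ne, beq_iff_eq]
      exact ⟨fun ⟨h1, h2⟩ => ⟨h2, h1.symm⟩, fun ⟨h1, h2⟩ => ⟨h2.symm, h1⟩⟩
  have e4 : pvCP (fun _ _ => true) z = pvCP pvSS z + pvCP pvSD z + pvCP pvDS z + pvCP pvDD z := by
    have h1 := pvCP_split (fun _ _ : String × String => true)
      (fun x y : String × String => x.1 == y.1) z
    have h2 := pvCP_split (fun x y : String × String => true && (x.1 == y.1))
      (fun x y : String × String => x.2 == y.2) z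
    have h3 := pvCP_split (fun x y : String × String => true && !(x.1 == y.1))
      (fun x y : String × String => x.2 == y.2) z
    rw [h1, h2, h3]
    have c1 : pvCP (fun x y : String × String => (true && (x.1 == y.1)) && (x.2 == y.2)) z = pvCP pvSS z :=
      pvCP_congr _ _ (fun x y => by simp [pvSS]) z
    have c2 : pvCP (fun x y : String × String => (true && (x.1 == y.1)) && !(x.2 == y.2)) z = pvCP pvSD z :=
      pvCP_congr _ _ (fun x y => by simp [pvSD]) z
    have c3 : pvCP (fun x y : String × String => (true && !(x.1 == y.1)) && (x.2 == y.2)) z = pvCP pvDS z :=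
      pvCP_congr _ _ (fun x y => by simp [pvDS]) z
    have c4 : pvCP (fun x y : String × String => (true && !(x.1 == y.1)) && !(x.2 == y.2)) z = pvCP pvDD z :=
      pvCP_congr _ _ (fun x y => by simp [pvDD]) z
    rw [c1, c2, c3, c4]
    ring
  have htot := pvCP_true z
  -- the total pair count as an Int division
  have hfd : PySem.Int.floordiv ((r.length : Int) * ((r.length : Int) - 1)) 2
      = (pvCP (fun _ _ => true) z : Int) := by
    rw [PySem.Int.floordiv_eq_ediv_of_pos (by norm_num)]
    have hnn : (r.length : Int) * (r.length : Int)
        = 2 * (pvCP (fun _ _ => true) z : Int) + (r.length : Int) := by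
      have := congrArg (fun n : Nat => (n : Int)) htot
      push_cast at this
      rw [hzl] at this
      linarith
    have hexp : (r.length : Int) * ((r.length : Int) - 1)
        = 2 * (pvCP (fun _ _ => true) z : Int) := by ring_nf; ring_nf at hnn; linarith
    rw [hexp]
    omega
  rw [hfd, e1, e2, e3, e4]
  simp only [List.cons.injEq, and_true]
  refine ⟨?_, ?_, ?_, ?_⟩ <;> first | trivial | (push_cast; ring)
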